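-- pv_equiv track=rewrite | github.com/Nefeldaiel/cruelty-free | main.py | parse_type_from_name
-- ===== SOURCE A (Python) =====
-- def parse_type_from_name(name_str):
--     predefined_types = ['v', 'sv', 'vt', 'bp', 'CPOF']
--     types = []
--     splits = str(name_str).split()
--     for item in splits:
--         if item in predefined_types:
--             types.append(item)
--             predefined_types.remove(item)
--     return types
-- ===== SOURCE B (Python) =====
-- def parse_type_from_name(name_str):
--     allowed = {'v', 'sv', 'vt', 'bp', 'CPOF'}
--     filtered = [w for w in str(name_str).split() if w in allowed]
--     return list(dict.fromkeys(filtered))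
-- ===== Notes on version B (the rewrite author's own statement) =====
-- stated objective: idiomatic
-- what changed: Replaced the remove-as-you-go loop over a shrinking candidate list by a two-phase filter (fixed membership set) followed by order-preserving deduplication via dict.fromkeys.
import Mathlib
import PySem

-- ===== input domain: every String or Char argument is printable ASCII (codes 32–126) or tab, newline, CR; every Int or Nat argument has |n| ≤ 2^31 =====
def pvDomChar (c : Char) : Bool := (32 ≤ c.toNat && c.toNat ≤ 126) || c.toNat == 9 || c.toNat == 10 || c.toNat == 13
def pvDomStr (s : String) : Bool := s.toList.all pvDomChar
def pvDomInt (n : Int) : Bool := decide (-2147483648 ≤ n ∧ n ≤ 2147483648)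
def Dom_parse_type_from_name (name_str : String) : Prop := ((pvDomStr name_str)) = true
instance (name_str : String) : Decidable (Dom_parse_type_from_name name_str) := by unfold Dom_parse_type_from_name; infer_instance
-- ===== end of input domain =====

-- B replaces A's remove-as-you-go loop by filter (fixed set) + dict.fromkeys dedup; idiomatic, same result.

-- ===== PORT A =====
-- loop body: 'if item in predefined_types: types.append(item); predefined_types.remove(item)'
-- (list.remove cannot fail here: it is guarded by the membership test, so .getD is exact)
def pvStepA (st : List String × List String) (item : String) : List String × List String :=
  if st.1.contains item then ((PySem.List.remove? st.1 item).getD st.1, st.2 ++ [item]) else st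

def parse_type_from_name (name_str : String) : List String :=
  -- str(name_str) is the identity on a String argument
  let splits := PySem.Str.split₀ name_str
  (splits.foldl pvStepA (["v", "sv", "vt", "bp", "CPOF"], [])).2

-- ===== PORT B =====
def parse_type_from_name_alt (name_str : String) : List String :=
  let allowed : PySem.Set String := PySem.Set.ofList ["v", "sv", "vt", "bp", "CPOF"]
  let filtered := (PySem.Str.split₀ name_str).filter (fun w => PySem.Set.contains allowed w)
  PySem.List.dedup filtered   -- list(dict.fromkeys(filtered))

-- ===== PRECONDITION & SPEC =====
def Spec_parse_type_from_name (name_str : String) (out : List String) : Prop := out = parse_type_from_name_alt name_str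
instance (name_str : String) (out : List String) : Decidable (Spec_parse_type_from_name name_str out) := by unfold Spec_parse_type_from_name; infer_instance

-- ===== CLAIM (what is proved, stated in full; the proofs are below) =====
def Claim_equal_parse_type_from_name : Prop := ∀ (name_str : String), Dom_parse_type_from_name name_str → Spec_parse_type_from_name name_str (parse_type_from_name name_str)

-- ===== LEMMAS AND PROOFS =====

-- B's step, after pushing the filter into the fold (List.foldl_filter)
def pvStepB (s : PySem.Set String) (w : String) : PySem.Set String :=
  if PySem.Set.contains (PySem.Set.ofList ["v", "sv", "vt", "bp", "CPOF"]) w then PySem.Set.add s w else s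

lemma pv_loop_eq (ws pred s : List String)
    (hnd : pred.Nodup)
    (hinv : ∀ w, w ∈ pred ↔ (w ∈ (["v", "sv", "vt", "bp", "CPOF"] : List String) ∧ w ∉ s)) :
    (ws.foldl pvStepA (pred, s)).2 = ws.foldl pvStepB s := by
  induction ws generalizing pred s with
  | nil => rfl
  | cons w t ih =>
    simp only [List.foldl_cons]
    by_cases hw : w ∈ pred
    · have hT : w ∈ (["v", "sv", "vt", "bp", "CPOF"] : List String) ∧ w ∉ s := (hinv w).mp hw
      have hA : pvStepA (pred, s) w = (pred.erase w, s ++ [w]) := by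
        simp [pvStepA, List.contains_iff_mem, hw, PySem.List.remove?_eq_some_erase pred w hw]
      have hB : pvStepB s w = s ++ [w] := by
        simp [pvStepB, PySem.Set.contains, PySem.Set.add, List.contains_iff_mem,
          PySem.Set.mem_ofList, hT.1, hT.2]
      rw [hA, hB]
      refine ih _ _ (hnd.erase w) ?_
      intro x
      rw [hnd.mem_erase_iff, hinv x]
      simp only [List.mem_append, List.mem_singleton]
      constructor
      · rintro ⟨hne, hxT, hxs⟩; exact ⟨hxT, by simp [hxs, hne]⟩
      · rintro ⟨hxT, hx⟩
        push_neg at hx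
        exact ⟨hx.2, hxT, hx.1⟩
    · have hA : pvStepA (pred, s) w = (pred, s) := by
        simp [pvStepA, List.contains_iff_mem, hw]
      have hB : pvStepB s w = s := by
        have := (hinv w)
        by_cases hT : w ∈ (["v", "sv", "vt", "bp", "CPOF"] : List String)
        · have hws : w ∈ s := by
            by_contra hws
            exact hw ((hinv w).mpr ⟨hT, hws⟩)
          simp [pvStepB, PySem.Set.add, List.contains_iff_mem, hws]
        · simp [pvStepB, PySem.Set.contains, List.contains_iff_mem, PySem.Set.mem_ofList, hT]
      rw [hA, hB]
      exact ih _ _ hnd hinv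

-- ===== VERDICT (by name: the statement is the Claim_ definition above) =====
theorem parse_type_from_name_spec : Claim_equal_parse_type_from_name := by
  intro name_str _
  unfold Spec_parse_type_from_name parse_type_from_name parse_type_from_name_alt
  rw [pv_loop_eq (PySem.Str.split₀ name_str) _ [] (by decide) (by intro w; simp)]
  show (PySem.Str.split₀ name_str).foldl
      (fun acc x => if PySem.Set.contains (PySem.Set.ofList ["v", "sv", "vt", "bp", "CPOF"]) x
        then PySem.Set.add acc x else acc) [] = _
  rw [PySem.List.foldl_if_eq_foldl_filter, PySem.List.dedup_eq_ofList, PySem.Set.ofList_eq_foldl]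
  rfl
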